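-- pv_equiv track=rewrite | github.com/choismne/ready-for-algorithm | 프로그래머스/0/120956. 옹알이 （1）/옹알이 （1）.py | solution
-- ===== SOURCE A (Python) =====
-- from itertools import permutations
--
-- def solution(babbling):
--     baby = ["aya", "ye", "woo", "ma"]
--     babyComb = []
--
--     for i in range(1, 5):
--         per = permutations(baby, i)
--         for p in per:
--             babyComb.append(''.join(p))
--
--     cnt = 0
--     for bab in babbling:
--         if bab in babyComb:
--             cnt+=1
--
--
--     return cnt
-- ===== SOURCE B (Python) =====
-- def solution(babbling):
--     words = ["aya", "ye", "woo", "ma"]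
--
--     def ok(s, avail, used_any):
--         # True iff s is a concatenation of distinct words from avail
--         # (at least one word used overall, tracked by used_any).
--         if not s:
--             return used_any
--         for w in avail:
--             if s.startswith(w) and ok(s[len(w):], [v for v in avail if v != w], True):
--                 return True
--         return False
--
--     return sum(1 for bab in babbling if ok(bab, words, False))
-- ===== Notes on version B (the rewrite author's own statement) =====
-- stated objective: faster
-- what changed: Instead of materialising all 64 permutation-joins of the four words and testing each babbling against that list, B parses each babbling directly by backtracking over unused word prefixes, recursing on the remaining suffix.
import Mathlib
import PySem

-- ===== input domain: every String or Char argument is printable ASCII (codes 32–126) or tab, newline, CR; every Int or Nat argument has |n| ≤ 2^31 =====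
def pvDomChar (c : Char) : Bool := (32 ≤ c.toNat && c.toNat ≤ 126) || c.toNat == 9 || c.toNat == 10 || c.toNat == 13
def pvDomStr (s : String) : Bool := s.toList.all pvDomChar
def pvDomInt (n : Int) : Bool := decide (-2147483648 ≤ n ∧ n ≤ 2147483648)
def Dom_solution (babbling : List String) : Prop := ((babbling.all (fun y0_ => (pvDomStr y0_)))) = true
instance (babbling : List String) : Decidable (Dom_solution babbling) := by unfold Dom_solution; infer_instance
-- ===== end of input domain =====

-- B replaces A's precomputed list of the 64 permutation-joins by a direct
-- backtracking parse of each babbling over the unused words (objective: faster).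

-- ===== PORT A =====
-- A: build every ''.join(p) for p in permutations(baby, i), i = 1..4, then count members.
-- i.toNat is exact here: every i produced by range(1, 5) is a nonnegative Int.
def solution (babbling : List String) : Int :=
  let baby : List String := ["aya", "ye", "woo", "ma"]
  let babyComb : List String :=
    (PySem.List.pyRange 1 5).foldl
      (fun acc i =>
        acc ++ (PySem.List.permutations baby i.toNat).map (fun p => PySem.Str.join "" p)) []
  babbling.foldl (fun cnt bab => if babyComb.contains bab then cnt + 1 else cnt) 0

-- ===== PORT B =====
-- B's helper ok(s, avail, used_any): s.startswith(w) is PySem.Chars.startswith on the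
-- character list; s[len(w):] (nonnegative in-range start) is List.drop.
def solution_ok (s : List Char) (avail : List String) (usedAny : Bool) : Bool :=
  if s.isEmpty then usedAny
  else
    avail.attach.any (fun w =>
      PySem.Chars.startswith s w.1.toList &&
        solution_ok (s.drop w.1.toList.length) (avail.filter (fun v => v ≠ w.1)) true)
termination_by avail.length
decreasing_by
  rw [List.length_unattach, ← List.length_attach (l := avail)]
  exact List.length_filter_lt_length_iff_exists.mpr ⟨w, List.mem_attach _ _, by simp⟩

-- sum(1 for bab in babbling if ok(...)) is the count of matching elements.
def solution_alt (babbling : List String) : Int :=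
  let words : List String := ["aya", "ye", "woo", "ma"]
  (babbling.countP (fun bab => solution_ok bab.toList words false) : Int)

-- ===== PRECONDITION & SPEC =====
def Spec_solution (babbling : List String) (out : Int) : Prop := out = solution_alt babbling
instance (babbling : List String) (out : Int) : Decidable (Spec_solution babbling out) := by unfold Spec_solution; infer_instance

-- ===== CLAIM (what is proved, stated in full; the proofs are below) =====
def Claim_equal_solution : Prop := ∀ (babbling : List String), Dom_solution babbling → Spec_solution babbling (solution babbling)

-- ===== LEMMAS AND PROOFS =====

-- All strings obtainable by concatenating distinct words of `avail` (at least one),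
-- with enough fuel (n ≥ avail.length); structural in the fuel so the kernel computes it.
def pvCombos : Nat → List String → List (List Char)
  | 0, _ => []
  | n + 1, avail =>
    avail.flatMap (fun w =>
      w.toList :: (pvCombos n (avail.filter (fun v => v ≠ w))).map (fun t => w.toList ++ t))

lemma pvCombos_ne_nil (n : Nat) (avail : List String) (hne : ∀ w ∈ avail, w.toList ≠ [])
    (t : List Char) (ht : t ∈ pvCombos n avail) : t ≠ [] := by
  cases n with
  | zero => cases ht
  | succ m =>
    simp only [pvCombos, List.mem_flatMap, List.mem_cons, List.mem_map] at ht
    obtain ⟨w, hw, hcase⟩ := ht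
    rcases hcase with h | ⟨t', _, h⟩
    · exact h ▸ hne w hw
    · subst h
      intro hcontra
      exact hne w hw (List.append_eq_nil_iff.mp hcontra).1

lemma solution_ok_iff (n : Nat) : ∀ (avail : List String), avail.length ≤ n →
    (∀ w ∈ avail, w.toList ≠ []) → ∀ (s : List Char) (u : Bool),
    (solution_ok s avail u = true ↔ ((s = [] ∧ u = true) ∨ s ∈ pvCombos n avail)) := by
  induction n with
  | zero =>
    intro avail hlen hne s u
    have havail : avail = [] := List.length_eq_zero_iff.mp (Nat.le_zero.mp hlen)
    subst havail
    rw [solution_ok.eq_def]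
    cases s <;> simp [pvCombos]
  | succ m ih =>
    intro avail hlen hne s u
    rw [solution_ok.eq_def]
    cases s with
    | nil =>
      simp only [List.isEmpty_nil, if_true]
      constructor
      · intro hu; exact Or.inl ⟨by simp, hu⟩
      · rintro (⟨-, hu⟩ | hmem)
        · exact hu
        · exact absurd rfl (pvCombos_ne_nil (m + 1) avail hne [] hmem)
    | cons c cs =>
      simp only [List.isEmpty_cons, if_false, Bool.false_eq_true]
      simp only [pvCombos, List.any_eq_true, List.mem_attach, true_and, Bool.and_eq_true,
        List.mem_flatMap, List.mem_cons, List.mem_map, Subtype.exists]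
      constructor
      · rintro ⟨w, hw, hpre, hok⟩
        have hfl : (avail.filter (fun v => decide (v ≠ w))).length ≤ m := by
          have : (avail.filter (fun v => decide (v ≠ w))).length < avail.length :=
            List.length_filter_lt_length_iff_exists.mpr ⟨w, hw, by simp⟩
          omega
        have hfne : ∀ v ∈ avail.filter (fun v => decide (v ≠ w)), v.toList ≠ [] :=
          fun v hv => hne v (List.mem_of_mem_filter hv)
        have hrest := (ih _ hfl hfne _ true).mp hok
        have hpre' : w.toList <+: (c :: cs) :=
          List.isPrefixOf_iff_prefix.mp (by simpa [PySem.Chars.startswith] using hpre)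
        have htake : (c :: cs).take w.toList.length = w.toList :=
          (List.prefix_iff_eq_take.mp hpre').symm
        refine Or.inr ⟨w, hw, ?_⟩
        rcases hrest with ⟨hdrop, -⟩ | hmem
        · left
          have := List.take_append_drop w.toList.length (c :: cs)
          rw [htake, hdrop, List.append_nil] at this
          exact this.symm
        · right
          exact ⟨(c :: cs).drop w.toList.length, hmem, List.prefix_iff_eq_append.mp hpre'⟩
      · rintro (⟨hnil, -⟩ | ⟨w, hw, hcase⟩)
        · exact absurd hnil (by simp)
        · have hfl : (avail.filter (fun v => decide (v ≠ w))).length ≤ m := by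
            have : (avail.filter (fun v => decide (v ≠ w))).length < avail.length :=
              List.length_filter_lt_length_iff_exists.mpr ⟨w, hw, by simp⟩
            omega
          have hfne : ∀ v ∈ avail.filter (fun v => decide (v ≠ w)), v.toList ≠ [] :=
            fun v hv => hne v (List.mem_of_mem_filter hv)
          rcases hcase with heq | ⟨t, ht, heq⟩
          · refine ⟨w, hw, ?_, ?_⟩
            · simp only [PySem.Chars.startswith, List.isPrefixOf_iff_prefix]
              rw [heq]
            · rw [heq, List.drop_length]
              exact (ih _ hfl hfne [] true).mpr (Or.inl ⟨rfl, rfl⟩)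
          · refine ⟨w, hw, ?_, ?_⟩
            · simp only [PySem.Chars.startswith, List.isPrefixOf_iff_prefix]
              rw [← heq]
              exact List.prefix_append _ _
            · rw [← heq, List.drop_left]
              exact (ih _ hfl hfne t true).mpr (Or.inr ht)

-- The 64 strings A's permutation loop produces (verified by kernel computation).
def pvLit64 : List String :=
  ["aya", "ye", "woo", "ma", "ayaye", "ayawoo", "ayama", "yeaya", "yewoo", "yema",
   "wooaya", "wooye", "wooma", "maaya", "maye", "mawoo", "ayayewoo", "ayayema",
   "ayawooye", "ayawooma", "ayamaye", "ayamawoo", "yeayawoo", "yeayama", "yewooaya",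
   "yewooma", "yemaaya", "yemawoo", "wooayaye", "wooayama", "wooyeaya", "wooyema",
   "woomaaya", "woomaye", "maayaye", "maayawoo", "mayeaya", "mayewoo", "mawooaya",
   "mawooye", "ayayewooma", "ayayemawoo", "ayawooyema", "ayawoomaye", "ayamayewoo",
   "ayamawooye", "yeayawooma", "yeayamawoo", "yewooayama", "yewoomaaya", "yemaayawoo",
   "yemawooaya", "wooayayema", "wooayamaye", "wooyeayama", "wooyemaaya", "woomaayaye",
   "woomayeaya", "maayayewoo", "maayawooye", "mayeayawoo", "mayewooaya", "mawooayaye",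
   "mawooyeaya"]

lemma pvComb_eval :
    (PySem.List.pyRange 1 5).foldl
      (fun acc i =>
        acc ++ (PySem.List.permutations ["aya", "ye", "woo", "ma"] i.toNat).map
          (fun p => PySem.Str.join "" p)) [] = pvLit64 := by
  decide

lemma pvMem_iff (x : List Char) :
    x ∈ pvLit64.map String.toList ↔ x ∈ pvCombos 4 ["aya", "ye", "woo", "ma"] := by
  constructor
  · intro hx
    have h : ∀ y ∈ pvLit64.map String.toList, y ∈ pvCombos 4 ["aya", "ye", "woo", "ma"] := by
      decide
    exact h x hx
  · intro hx
    have h : ∀ y ∈ pvCombos 4 ["aya", "ye", "woo", "ma"], y ∈ pvLit64.map String.toList := by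
      decide
    exact h x hx

lemma pvPred_eq (bab : String) :
    pvLit64.contains bab = solution_ok bab.toList ["aya", "ye", "woo", "ma"] false := by
  have hne : ∀ w ∈ (["aya", "ye", "woo", "ma"] : List String), w.toList ≠ [] := by decide
  have hok := solution_ok_iff 4 ["aya", "ye", "woo", "ma"] (by decide) hne bab.toList false
  rw [Bool.eq_iff_iff, List.contains_iff_mem, hok]
  constructor
  · intro h
    exact Or.inr ((pvMem_iff _).mp (List.mem_map_of_mem h))
  · rintro (⟨-, h⟩ | h)
    · exact absurd h (by simp)
    · obtain ⟨t, ht, htl⟩ := List.mem_map.mp ((pvMem_iff _).mpr h)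
      exact String.toList_inj.mp htl ▸ ht

-- ===== VERDICT (by name: the statement is the Claim_ definition above) =====
theorem solution_spec : Claim_equal_solution := by
  intro babbling _
  unfold Spec_solution
  show solution babbling = solution_alt babbling
  simp only [solution, solution_alt, pvComb_eval, pvPred_eq]
  rw [PySem.List.foldl_count_if]
  simp
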